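-- pv_equiv track=rewrite | github.com/avk-ho/algorithms-solving | python/minimum_characters_for_words.py | minimumCharactersForWords
-- ===== SOURCE A (Python) =====
-- def minimumCharactersForWords(words):
--     letters_dict = {}
--
--     # Looping through all words
--     for word in words:
--         letters_temp = {}
--
--         # Looping through all letters in a word, counting the number of each character
--         for letter in word:
--             if letter in letters_temp:
--                 letters_temp[letter] += 1
--             else:
--                 letters_temp[letter] = 1
--
--         # Looping through the resulting dict and comparing to the pre output one
--         for letter in letters_temp:
--             if letter in letters_dict:
--                 if letters_temp[letter] > letters_dict[letter]:
--                     letters_dict[letter] = letters_temp[letter]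
--             else:
--                 letters_dict[letter] = letters_temp[letter]
--
--     # Looping through the pre output dict to generate the output
--     output = []
--     for letter in letters_dict:
--         for n in range(letters_dict[letter]):
--             output.append(letter)
--
--     return output
-- ===== SOURCE B (Python) =====
-- def minimumCharactersForWords(words):
--     # char-major: for each distinct character (first-appearance order),
--     # the needed amount is the largest count it has in any single word
--     order = dict.fromkeys(c for w in words for c in w)
--     return [c for c in order for _ in range(max(w.count(c) for w in words))]
-- ===== Notes on version B (the rewrite author's own statement) =====
-- stated objective: alternative
-- what changed: A is word-major: it builds a per-word count dict and max-merges it into a running dict, then expands the dict; B is char-major with no dicts or merging: it dedups the characters in first-appearance order and, for each one, emits it max(w.count(c) for w in words) times.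
import Mathlib
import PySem

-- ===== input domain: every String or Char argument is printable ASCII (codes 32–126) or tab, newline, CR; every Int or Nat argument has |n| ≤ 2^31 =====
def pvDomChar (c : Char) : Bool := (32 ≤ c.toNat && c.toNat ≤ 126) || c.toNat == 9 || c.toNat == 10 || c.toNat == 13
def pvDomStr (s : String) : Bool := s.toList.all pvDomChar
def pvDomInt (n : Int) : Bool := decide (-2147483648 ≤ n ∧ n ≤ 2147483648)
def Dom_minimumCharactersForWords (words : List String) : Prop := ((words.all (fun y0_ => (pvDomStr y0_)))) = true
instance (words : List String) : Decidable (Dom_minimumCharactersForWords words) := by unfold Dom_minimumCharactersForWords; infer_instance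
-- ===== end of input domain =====

-- A is word-major (per-word count dict, max-merged into a running dict, then expanded); B is
-- char-major with no dicts or merging: dedup the characters in first-appearance order and emit each
-- one max(w.count(c) for w in words) times. Alternative decomposition, similar cost.

-- ===== PORT A =====
-- inner loop: count the letters of one word into a fresh dict
def pvCountWord (w : List Char) : PySem.Dict Char Int :=
  w.foldl (fun d c =>
    match d.get? c with
    | some v => d.insert c (v + 1)
    | none => d.insert c 1) PySem.Dict.empty

-- merge loop body: keep the larger count per letter
def pvMergeStep (acc : PySem.Dict Char Int) (kv : Char × Int) : PySem.Dict Char Int :=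
  match acc.get? kv.1 with
  | some w => if kv.2 > w then acc.insert kv.1 kv.2 else acc
  | none => acc.insert kv.1 kv.2

def minimumCharactersForWords (words : List String) : List String :=
  let lettersDict := words.foldl
    (fun acc word => (pvCountWord word.toList).items.foldl pvMergeStep acc)
    PySem.Dict.empty
  lettersDict.items.foldl
    (fun out kv => (PySem.List.pyRange 0 kv.2 1).foldl (fun o _ => o ++ [String.ofList [kv.1]]) out) []

-- ===== PORT B =====
-- order = dict.fromkeys(c for w in words for c in w); then
-- [c for c in order for _ in range(max(w.count(c) for w in words))]
-- (the 'none' arm is Python's ValueError of max() on an empty iterable — unreachable, since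
-- a nonempty 'order' forces 'words' to be nonempty)
def minimumCharactersForWords_alt (words : List String) : List String :=
  let order := PySem.List.dedup (words.flatMap (fun w => w.toList.map (fun c => String.ofList [c])))
  order.flatMap (fun c =>
    match PySem.List.max? (words.map (fun w => (PySem.Str.count w c : Int))) (fun y => y) with
    | some m => (PySem.List.pyRange 0 m).map (fun _ => c)
    | none => [])

-- ===== PRECONDITION & SPEC =====
def Spec_minimumCharactersForWords (words : List String) (out : List String) : Prop := out = minimumCharactersForWords_alt words
instance (words : List String) (out : List String) : Decidable (Spec_minimumCharactersForWords words out) := by unfold Spec_minimumCharactersForWords; infer_instance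

-- ===== CLAIM (what is proved, stated in full; the proofs are below) =====
def Claim_equal_minimumCharactersForWords : Prop := ∀ (words : List String), Dom_minimumCharactersForWords words → Spec_minimumCharactersForWords words (minimumCharactersForWords words)

-- ===== LEMMAS AND PROOFS =====

-- str.count with a single-character needle is List.count
lemma pvCountGo_singleton (c : Char) (rest : List Char) : ∀ (fuel acc : Nat), rest.length ≤ fuel →
    PySem.Chars.count.go [c] fuel rest acc = acc + rest.count c := by
  induction rest with
  | nil => intro fuel acc _; cases fuel <;> simp [PySem.Chars.count.go]
  | cons h t ih =>
    intro fuel acc hf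
    cases fuel with
    | zero => simp at hf
    | succ n =>
      rw [PySem.Chars.count.go]
      simp only [List.length_cons, Nat.add_le_add_iff_right] at hf
      by_cases hc : c = h
      · subst hc
        simp only [List.isPrefixOf, BEq.rfl, Bool.true_and, if_true,
          List.length_singleton, List.drop_one, List.tail_cons]
        rw [ih n (acc + 1) hf]
        simp
        omega
      · rw [if_neg (by simp [List.isPrefixOf, hc])]
        rw [ih n acc hf]
        simp [Ne.symm hc]

lemma pvStrCount_singleton (w : String) (c : Char) :
    PySem.Str.count w (String.ofList [c]) = w.toList.count c := by
  show PySem.Chars.count w.toList (String.ofList [c]).toList = _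
  rw [String.toList_ofList]
  unfold PySem.Chars.count
  rw [if_neg (by simp)]
  simpa using pvCountGo_singleton c w.toList w.toList.length 0 le_rfl

-- A's inner counting loop is Counter(word)
lemma pvCountWord_eq_counter (w : List Char) : pvCountWord w = PySem.Dict.counter w := by
  rw [← PySem.Dict.foldl_insert_getD_add_one_eq_counter]
  unfold pvCountWord
  congr 1
  funext d c
  rw [PySem.Dict.getD_eq_get?_getD]
  cases h : d.get? c with
  | none => rfl
  | some v => rfl

-- Set.add absorbs a member / appends a non-member
lemma pvAdd_mem {α : Type} [BEq α] [LawfulBEq α] (s : PySem.Set α) (x : α) (h : x ∈ s) :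
    PySem.Set.add s x = s := by
  simp [PySem.Set.add, PySem.Set.contains, h]

lemma pvAdd_not_mem {α : Type} [BEq α] [LawfulBEq α] (s : PySem.Set α) (x : α) (h : x ∉ s) :
    PySem.Set.add s x = s ++ [x] := by
  simp [PySem.Set.add, PySem.Set.contains, h]

-- updating with set(xs) is the same as updating with xs
lemma pvUpdate_ofList {α : Type} [BEq α] [LawfulBEq α] (xs : List α) : ∀ s : PySem.Set α,
    PySem.Set.update s (PySem.Set.ofList xs) = PySem.Set.update s xs := by
  induction xs using List.reverseRecOn with
  | nil => intro s; rfl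
  | append_singleton ys x ih =>
    intro s
    have hof : PySem.Set.ofList (ys ++ [x]) = PySem.Set.add (PySem.Set.ofList ys) x := by
      rw [PySem.Set.ofList_eq_foldl, PySem.Set.ofList_eq_foldl, List.foldl_append]
      rfl
    by_cases hx : x ∈ PySem.Set.ofList ys
    · rw [hof, pvAdd_mem _ _ hx, ih s]
      unfold PySem.Set.update
      rw [List.foldl_append]
      have hxys : x ∈ ys := (PySem.Set.mem_ofList ys x).mp hx
      have : x ∈ List.foldl PySem.Set.add s ys := by
        rw [show List.foldl PySem.Set.add s ys = List.foldl (fun t b => PySem.Set.add t (id b)) s ys from rfl]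
        exact (PySem.Set.mem_foldl_add ys id s x).mpr (Or.inr ⟨x, hxys, rfl⟩)
      simp [List.foldl, pvAdd_mem _ _ this]
    · rw [hof, pvAdd_not_mem _ _ hx]
      unfold PySem.Set.update
      rw [List.foldl_append, List.foldl_append]
      simp only [List.foldl_cons, List.foldl_nil]
      rw [show List.foldl PySem.Set.add s (PySem.Set.ofList ys) = PySem.Set.update s (PySem.Set.ofList ys) from rfl,
        ih s]
      rfl

-- set() commutes with mapping an injective function
lemma pvOfList_map (l : List Char) :
    PySem.Set.ofList (l.map (fun c => String.ofList [c]))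
      = (PySem.Set.ofList l).map (fun c => String.ofList [c]) := by
  have hinj : ∀ a b : Char, String.ofList [a] = String.ofList [b] → a = b := by
    intro a b h
    have := congrArg String.toList h
    simpa using this
  induction l using List.reverseRecOn with
  | nil => rfl
  | append_singleton ys x ih =>
    rw [List.map_append, List.map_singleton]
    rw [PySem.Set.ofList_eq_foldl, List.foldl_append, ← PySem.Set.ofList_eq_foldl]
    rw [PySem.Set.ofList_eq_foldl (ys ++ [x]), List.foldl_append, ← PySem.Set.ofList_eq_foldl]
    simp only [List.foldl_cons, List.foldl_nil]
    by_cases hx : x ∈ PySem.Set.ofList ys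
    · rw [pvAdd_mem _ _ hx]
      have : String.ofList [x] ∈ PySem.Set.ofList (ys.map (fun c => String.ofList [c])) := by
        rw [ih]
        exact List.mem_map_of_mem hx
      rw [pvAdd_mem _ _ this, ih]
    · rw [pvAdd_not_mem _ _ hx]
      have : String.ofList [x] ∉ PySem.Set.ofList (ys.map (fun c => String.ofList [c])) := by
        rw [ih]
        intro hmem
        obtain ⟨y, hy, he⟩ := List.mem_map.mp hmem
        exact hx (hinj y x he ▸ hy)
      rw [pvAdd_not_mem _ _ this, ih, List.map_append, List.map_singleton]

-- the merge fold's keys: each merged key is Set.add'ed in order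
lemma pvMergeFold_keys (l : List (Char × Int)) : ∀ d : PySem.Dict Char Int,
    (l.foldl pvMergeStep d).keys = l.foldl (fun ks kv => PySem.Set.add ks kv.1) d.keys := by
  induction l with
  | nil => intro d; rfl
  | cons kv t ih =>
    intro d
    simp only [List.foldl_cons]
    rw [ih]
    congr 1
    cases h : d.get? kv.1 with
    | none =>
      have hc : d.contains kv.1 = false := by
        rw [PySem.Dict.contains_eq_isSome_get?, h]; rfl
      have hk : kv.1 ∉ d.keys := (PySem.Dict.get?_eq_none_iff_not_mem_keys d kv.1).mp h
      simp only [pvMergeStep, h]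
      rw [PySem.Dict.keys_insert_of_not_contains _ _ hc, pvAdd_not_mem _ _ hk]
    | some w =>
      have hc : d.contains kv.1 = true := by
        rw [PySem.Dict.contains_eq_isSome_get?, h]; rfl
      have hk : kv.1 ∈ d.keys := (PySem.Dict.contains_iff_mem_keys d kv.1).mp hc
      simp only [pvMergeStep, h]
      split_ifs with hgt
      · rw [PySem.Dict.keys_insert_of_contains _ _ hc, pvAdd_mem _ _ hk]
      · rw [pvAdd_mem _ _ hk]

-- the merge fold's value at c: a running max over the merged entries with key c
lemma pvMergeFold_getD (l : List (Char × Int)) (c : Char) : ∀ d : PySem.Dict Char Int,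
    0 ≤ d.getD c 0 → (∀ kv ∈ l, 0 ≤ kv.2) →
    (l.foldl pvMergeStep d).getD c 0
      = l.foldl (fun acc kv => if kv.1 = c then max acc kv.2 else acc) (d.getD c 0) := by
  induction l with
  | nil => intro d _ _; rfl
  | cons kv t ih =>
    intro d h0 hpos
    have hv : 0 ≤ kv.2 := hpos kv List.mem_cons_self
    have hstep : (pvMergeStep d kv).getD c 0 = if kv.1 = c then max (d.getD c 0) kv.2 else d.getD c 0 := by
      by_cases hkc : kv.1 = c
      · subst hkc
        rw [if_pos rfl]
        cases h : d.get? kv.1 with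
        | none =>
          have hdk : d.getD kv.1 0 = 0 := PySem.Dict.getD_of_get?_eq_none d 0 h
          simp only [pvMergeStep, h]
          rw [PySem.Dict.getD_insert_self, hdk, max_eq_right hv]
        | some w =>
          have hdk : d.getD kv.1 0 = w := PySem.Dict.getD_of_get?_eq_some d 0 h
          simp only [pvMergeStep, h]
          split_ifs with hgt
          · rw [PySem.Dict.getD_insert_self, hdk, max_eq_right (le_of_lt hgt)]
          · rw [hdk, max_eq_left (by omega)]
      · rw [if_neg hkc]
        cases h : d.get? kv.1 with
        | none =>
          simp only [pvMergeStep, h]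
          exact PySem.Dict.getD_insert_of_ne d _ _ (fun h' => hkc h'.symm)
        | some w =>
          simp only [pvMergeStep, h]
          split_ifs with hgt
          · exact PySem.Dict.getD_insert_of_ne d _ _ (fun h' => hkc h'.symm)
          · rfl
    simp only [List.foldl_cons]
    rw [ih (pvMergeStep d kv) (by rw [hstep]; split_ifs <;> [exact le_max_of_le_left h0; exact h0])
      (fun p hp => hpos p (List.mem_cons_of_mem _ hp)), hstep]

-- the running max over a nodup key list picks out c's entry (if any)
lemma pvFoldIf_nodup (ks : List Char) (c : Char) (f : Char → Int) :
    ∀ a : Int, ks.Nodup →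
    ks.foldl (fun acc k => if k = c then max acc (f k) else acc) a
      = if c ∈ ks then max a (f c) else a := by
  induction ks with
  | nil => intro a _; simp
  | cons k t ih =>
    intro a hnd
    simp only [List.foldl_cons]
    by_cases hk : k = c
    · subst hk
      rw [if_pos rfl, ih (max a (f k)) hnd.of_cons,
        if_neg ((List.nodup_cons.mp hnd).1), if_pos List.mem_cons_self]
    · rw [if_neg hk, ih a hnd.of_cons]
      by_cases hc : c ∈ t
      · rw [if_pos hc, if_pos (List.mem_cons_of_mem _ hc)]
      · rw [if_neg hc, if_neg (by simp [Ne.symm hk, hc])]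

-- merging one word's counter: keys gain the word's letters, values take the max with its counts
lemma pvMergeCounter_keys (xs : List Char) (d : PySem.Dict Char Int) :
    ((PySem.Dict.counter xs).items.foldl pvMergeStep d).keys = PySem.Set.update d.keys xs := by
  rw [pvMergeFold_keys, PySem.Dict.items_counter, List.foldl_map]
  exact pvUpdate_ofList xs d.keys

lemma pvMergeCounter_getD (xs : List Char) (d : PySem.Dict Char Int) (c : Char)
    (h0 : 0 ≤ d.getD c 0) :
    ((PySem.Dict.counter xs).items.foldl pvMergeStep d).getD c 0
      = max (d.getD c 0) (xs.count c : Int) := by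
  rw [pvMergeFold_getD _ c d h0 (by
      intro kv hkv
      rw [PySem.Dict.items_counter] at hkv
      obtain ⟨k, _, rfl⟩ := List.mem_map.mp hkv
      positivity),
    PySem.Dict.items_counter, List.foldl_map,
    pvFoldIf_nodup _ c _ _ (PySem.Set.nodup_ofList xs)]
  by_cases hc : c ∈ xs
  · rw [if_pos ((PySem.Set.mem_ofList xs c).mpr hc)]
  · rw [if_neg (fun h => hc ((PySem.Set.mem_ofList xs c).mp h)),
      List.count_eq_zero.mpr hc]
    simp [max_eq_left h0]

-- A's outer fold, keys: the words' letters Set.update'd in order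
lemma pvOuter_keys (ws : List String) : ∀ d : PySem.Dict Char Int,
    (ws.foldl (fun acc word => (pvCountWord word.toList).items.foldl pvMergeStep acc) d).keys
      = PySem.Set.update d.keys (ws.flatMap String.toList) := by
  induction ws with
  | nil => intro d; rfl
  | cons w t ih =>
    intro d
    simp only [List.foldl_cons, List.flatMap_cons]
    rw [ih, pvCountWord_eq_counter, pvMergeCounter_keys]
    unfold PySem.Set.update
    rw [List.foldl_append]

-- A's outer fold, values: the running max of per-word counts
lemma pvOuter_getD (ws : List String) (c : Char) : ∀ d : PySem.Dict Char Int, 0 ≤ d.getD c 0 →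
    (ws.foldl (fun acc word => (pvCountWord word.toList).items.foldl pvMergeStep acc) d).getD c 0
      = ws.foldl (fun acc w => max acc ((w.toList.count c : Int))) (d.getD c 0) := by
  induction ws with
  | nil => intro d _; rfl
  | cons w t ih =>
    intro d h0
    simp only [List.foldl_cons]
    rw [pvCountWord_eq_counter, ih _ (by rw [pvMergeCounter_getD _ _ _ h0]; exact le_max_of_le_left h0),
      pvMergeCounter_getD _ _ _ h0]

-- A's emit loop over one dict entry appends kv.2 copies
lemma pvFoldl_snoc_const {α : Type} (s : String) (l : List α) (out : List String) :
    l.foldl (fun o _ => o ++ [s]) out = out ++ List.replicate l.length s := by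
  induction l generalizing out with
  | nil => simp
  | cons x t ih => simp [List.foldl_cons, ih, List.replicate_succ]

-- A's emit loop is a flatMap of replicates
lemma pvEmit_eq (items : List (Char × Int)) :
    items.foldl
      (fun out kv => (PySem.List.pyRange 0 kv.2 1).foldl (fun o _ => o ++ [String.ofList [kv.1]]) out) []
      = items.flatMap (fun kv => List.replicate kv.2.toNat (String.ofList [kv.1])) := by
  have h : ∀ kv : Char × Int,
      (fun out => (PySem.List.pyRange 0 kv.2 1).foldl (fun o (_ : Int) => o ++ [String.ofList [kv.1]]) out)
        = fun out => out ++ List.replicate kv.2.toNat (String.ofList [kv.1]) := by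
    intro kv
    funext out
    rw [pvFoldl_snoc_const, PySem.List.length_pyRange_one]
    norm_num
  calc items.foldl
        (fun out kv => (PySem.List.pyRange 0 kv.2 1).foldl (fun o _ => o ++ [String.ofList [kv.1]]) out) []
      = items.foldl (fun out kv => out ++ List.replicate kv.2.toNat (String.ofList [kv.1])) [] := by
        congr 1
        funext out kv
        exact congrFun (h kv) out
    _ = _ := by rw [PySem.List.foldl_append_eq_flatMap]; simp

-- ===== VERDICT (by name: the statement is the Claim_ definition above) =====
theorem minimumCharactersForWords_spec : Claim_equal_minimumCharactersForWords := by
  intro words _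
  unfold Spec_minimumCharactersForWords minimumCharactersForWords minimumCharactersForWords_alt
  simp only []
  -- A's final dict
  set D := words.foldl (fun acc word => (pvCountWord word.toList).items.foldl pvMergeStep acc)
    PySem.Dict.empty with hD
  have hkeys : D.keys = PySem.Set.ofList (words.flatMap String.toList) := by
    rw [hD, pvOuter_keys]
    rw [PySem.Set.ofList_eq_foldl]
    rfl
  have hget : ∀ c, D.getD c 0
      = words.foldl (fun acc w => max acc ((w.toList.count c : Int))) 0 := by
    intro c
    rw [hD, pvOuter_getD words c PySem.Dict.empty (le_of_eq rfl)]
    rfl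
  have hnd : D.keys.Nodup := by rw [hkeys]; exact PySem.Set.nodup_ofList _
  rw [pvEmit_eq, PySem.Dict.items_eq_map_keys D hnd 0, hkeys, List.flatMap_map]
  -- B's order list
  have hflat : words.flatMap (fun w => w.toList.map (fun c => String.ofList [c]))
      = (words.flatMap String.toList).map (fun c => String.ofList [c]) := by
    rw [List.map_flatMap]
  rw [PySem.List.dedup_eq_ofList, hflat, pvOfList_map, List.flatMap_map]
  -- pointwise over the members of the common order list
  unfold List.flatMap
  congr 1
  apply List.map_congr_left
  intro c hc
  have hcw : c ∈ words.flatMap String.toList :=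
    (PySem.Set.mem_ofList _ c).mp hc
  obtain ⟨w0, hw0, _⟩ := List.mem_flatMap.mp hcw
  -- words is nonempty, so max() is defined
  obtain ⟨pre, t, rfl⟩ : ∃ pre t, words = pre :: t := by
    cases words with
    | nil => cases hw0
    | cons a l => exact ⟨a, l, rfl⟩
  rw [List.map_cons, PySem.List.max?_id_cons]
  simp only []
  rw [hget c]
  have hcnt : ∀ w : String, (PySem.Str.count w (String.ofList [c]) : Int) = (w.toList.count c : Int) := by
    intro w
    rw [pvStrCount_singleton]
  simp only [hcnt]
  rw [List.map_const', PySem.List.length_pyRange_one]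
  congr 1
  · simp only [List.foldl_cons, List.foldl_map]
    rw [max_eq_right (by positivity)]
    norm_num
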